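-- pv_equiv track=rewrite | github.com/EugeneMMF/AI | neural networks/neural_net.py | full_correlate
-- ===== SOURCE A (Python) =====
-- def valid_correlate(matrix, kernel):
--     result = []
--     kernel_size = len(kernel)
--     end_row = len(matrix) - kernel_size + 1
--     end_column = len(matrix[0]) - kernel_size + 1
--     for i in range(end_row):
--         row = []
--         for j in range(end_column):
--             ans = 0
--             for k in range(kernel_size):
--                 for l in range(kernel_size):
--                     ans += matrix[i + k][j + l] * kernel[k][l]
--             row.append(ans)
--         result.append(row)
--     return result
--
-- def full_correlate(matrix, kernel):
--     kernel_size = len(kernel)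
--     damping = kernel_size - 1
--     new_matrix = []
--     for i in range(damping):
--         new_matrix.append(list(0 for j in range(len(matrix[0]) + 2 * damping)))
--     for i in range(len(matrix)):
--         arr = list(0 for j in range(damping))
--         arr.extend(matrix[i])
--         arr.extend(list(0 for j in range(damping)))
--         new_matrix.append(arr)
--     for i in range(damping):
--         new_matrix.append(list(0 for j in range(len(matrix[0]) + 2 * damping)))
--     return valid_correlate(new_matrix, kernel)
-- ===== SOURCE B (Python) =====
-- def full_correlate(matrix, kernel):
--     K = len(kernel)
--     m = len(matrix)
--     n0 = len(matrix[0])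
--     d = K - 1
--     out = []
--     for i in range(m + d):
--         row = []
--         for j in range(n0 + d):
--             s = 0
--             for a in range(K):
--                 r = i + a - d
--                 if 0 <= r < m:
--                     mr = matrix[r]
--                     for b in range(K):
--                         c = j + b - d
--                         if 0 <= c < len(mr):
--                             s += mr[c] * kernel[a][b]
--             row.append(s)
--         out.append(row)
--     return out
-- ===== Notes on version B (the rewrite author's own statement) =====
-- stated objective: alternative
-- what changed: B computes the full correlation directly with per-term bounds checks (skipping out-of-range zero-pad positions) instead of materialising a zero-padded matrix and running the valid correlation over it.
-- outside the precondition, e.g. on full_correlate([[1]], []): A returns [[0, 0], [0, 0]], B returns []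
import Mathlib
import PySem

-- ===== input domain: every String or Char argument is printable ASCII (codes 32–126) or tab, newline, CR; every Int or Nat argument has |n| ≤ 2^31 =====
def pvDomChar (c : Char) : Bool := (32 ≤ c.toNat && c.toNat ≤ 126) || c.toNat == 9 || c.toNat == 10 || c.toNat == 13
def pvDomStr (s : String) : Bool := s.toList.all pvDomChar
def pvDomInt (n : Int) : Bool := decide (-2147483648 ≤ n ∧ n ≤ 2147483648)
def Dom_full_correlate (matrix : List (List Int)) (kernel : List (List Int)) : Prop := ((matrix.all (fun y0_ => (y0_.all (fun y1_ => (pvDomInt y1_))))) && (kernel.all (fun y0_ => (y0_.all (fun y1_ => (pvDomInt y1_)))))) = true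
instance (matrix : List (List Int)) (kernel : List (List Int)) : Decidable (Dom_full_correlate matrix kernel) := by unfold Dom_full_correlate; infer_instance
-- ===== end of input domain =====

-- B computes the full correlation directly with per-term bounds checks instead of
-- building a zero-padded matrix and running the valid correlation over it (alternative decomposition).

-- ===== PORT A =====
-- helper: Python 'valid_correlate' (same module)
def valid_correlate_A (matrix : List (List Int)) (kernel : List (List Int)) : List (List Int) :=
  let kernelSize : Int := kernel.length
  let endRow : Int := (matrix.length : Int) - kernelSize + 1
  let endColumn : Int := ((PySem.List.pyGetD matrix 0 []).length : Int) - kernelSize + 1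
  (PySem.List.pyRange 0 endRow 1).map (fun i =>
    (PySem.List.pyRange 0 endColumn 1).map (fun j =>
      (PySem.List.pyRange 0 kernelSize 1).foldl (fun ans k =>
        (PySem.List.pyRange 0 kernelSize 1).foldl (fun ans l =>
          ans + PySem.List.pyGetD (PySem.List.pyGetD matrix (i + k) []) (j + l) 0
              * PySem.List.pyGetD (PySem.List.pyGetD kernel k []) l 0) ans) 0))

def full_correlate (matrix : List (List Int)) (kernel : List (List Int)) : List (List Int) :=
  let kernelSize : Int := kernel.length
  let damping : Int := kernelSize - 1
  let zeroRow : List Int := (PySem.List.pyRange 0 (((PySem.List.pyGetD matrix 0 []).length : Int) + 2 * damping) 1).map (fun _ => (0 : Int))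
  let top : List (List Int) := (PySem.List.pyRange 0 damping 1).map (fun _ => zeroRow)
  let zpad : List Int := (PySem.List.pyRange 0 damping 1).map (fun _ => (0 : Int))
  let mid : List (List Int) := matrix.map (fun row => zpad ++ row ++ zpad)
  valid_correlate_A (top ++ mid ++ top) kernel

-- ===== PORT B =====
def full_correlate_alt (matrix : List (List Int)) (kernel : List (List Int)) : List (List Int) :=
  let K : Int := kernel.length
  let m : Int := matrix.length
  let n0 : Int := (PySem.List.pyGetD matrix 0 []).length
  let d : Int := K - 1
  (PySem.List.pyRange 0 (m + d) 1).map (fun i =>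
    (PySem.List.pyRange 0 (n0 + d) 1).map (fun j =>
      (PySem.List.pyRange 0 K 1).foldl (fun s a =>
        if 0 ≤ i + a - d ∧ i + a - d < m then
          let mr := PySem.List.pyGetD matrix (i + a - d) []
          (PySem.List.pyRange 0 K 1).foldl (fun s b =>
            if 0 ≤ j + b - d ∧ j + b - d < (mr.length : Int) then
              s + PySem.List.pyGetD mr (j + b - d) 0
                * PySem.List.pyGetD (PySem.List.pyGetD kernel a []) b 0
            else s) s
        else s) 0))

-- ===== PRECONDITION & SPEC =====
-- Pre_ excludes inputs where A raises (empty matrix; a matrix row shorter than the first row;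
-- a kernel row shorter than the kernel height), and the degenerate empty kernel, on which A
-- happens to return a (m+1)x(n+1) zero matrix while B naturally returns a (m-1)x(n-1) one:
-- the output size of a full correlation with an empty kernel is a corner nobody specifies.
def Pre_full_correlate (matrix : List (List Int)) (kernel : List (List Int)) : Prop :=
  matrix ≠ [] ∧ kernel ≠ [] ∧
  (∀ row ∈ matrix, matrix.headI.length ≤ row.length) ∧
  (∀ row ∈ kernel, kernel.length ≤ row.length)
instance (matrix : List (List Int)) (kernel : List (List Int)) : Decidable (Pre_full_correlate matrix kernel) := by unfold Pre_full_correlate; infer_instance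

def pvWitness_full_correlate : List (List Int) × List (List Int) := ([[1, 2], [3, 4]], [[1, 0], [0, 1]])

def Spec_full_correlate (matrix : List (List Int)) (kernel : List (List Int)) (out : List (List Int)) : Prop := out = full_correlate_alt matrix kernel
instance (matrix : List (List Int)) (kernel : List (List Int)) (out : List (List Int)) : Decidable (Spec_full_correlate matrix kernel out) := by unfold Spec_full_correlate; infer_instance

-- ===== CLAIM (what is proved, stated in full; the proofs are below) =====
def Claim_equal_full_correlate : Prop := ∀ (matrix : List (List Int)) (kernel : List (List Int)), Dom_full_correlate matrix kernel → Pre_full_correlate matrix kernel → Spec_full_correlate matrix kernel (full_correlate matrix kernel)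

-- ===== LEMMAS AND PROOFS =====

lemma pv_map_const_pyRange {α : Type} (a b : Int) (x : α) :
    (PySem.List.pyRange a b 1).map (fun _ => x) = List.replicate (b - a).toNat x := by
  rw [List.map_const', PySem.List.length_pyRange_one]

lemma pv_foldl_if_add {α : Type} (l : List α) (P : α → Prop) [DecidablePred P] (g : α → Int) (a : Int) :
    l.foldl (fun s x => if P x then s + g x else s) a
      = a + (l.map (fun x => if P x then g x else 0)).sum := by
  have h : (fun (s : Int) x => if P x then s + g x else s)
      = fun (s : Int) x => s + (if P x then g x else 0) := by
    funext s x; split <;> simp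
  rw [h, PySem.List.foldl_add]

lemma pv_pyGetD_zero_list (xs : List Int) (h : ∀ x ∈ xs, x = 0) (i : Int) :
    PySem.List.pyGetD xs i 0 = 0 := by
  cases hg : PySem.List.pyGet? xs i with
  | none => simp [PySem.List.pyGetD, hg]
  | some x => simp [PySem.List.pyGetD, hg, h x (PySem.List.mem_of_pyGet?_eq_some xs hg)]

-- value of a zero-padded row at a nonnegative column index
lemma pv_pad_val (row : List Int) (dn : Nat) (c : Int) (hc : 0 ≤ c) :
    PySem.List.pyGetD (List.replicate dn (0 : Int) ++ row ++ List.replicate dn (0 : Int)) c 0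
      = if (dn : Int) ≤ c ∧ c < (dn : Int) + row.length
          then PySem.List.pyGetD row (c - dn) 0 else 0 := by
  rw [PySem.List.pyGetD_of_nonneg _ _ hc]
  split
  · rename_i hin
    rw [PySem.List.pyGetD_of_nonneg _ _ (by omega)]
    have h1 : c.toNat < (List.replicate dn (0 : Int) ++ row).length := by
      simp [List.length_replicate]; omega
    have h2 : (List.replicate dn (0 : Int)).length ≤ c.toNat := by
      simp [List.length_replicate]; omega
    simp only [List.getD, List.getElem?_append_left h1, List.getElem?_append_right h2,
      List.length_replicate]
    have : c.toNat - dn = (c - dn).toNat := by omega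
    rw [this]
  · rename_i hout
    rcases Nat.lt_or_ge c.toNat dn with hlt | hge
    · have h1 : c.toNat < (List.replicate dn (0 : Int)).length := by simpa using hlt
      have h2 : c.toNat < (List.replicate dn (0 : Int) ++ row).length := by
        simp [List.length_replicate]; omega
      simp [List.getD, List.getElem?_append_left h1, hlt]
    · have hge2 : dn + row.length ≤ c.toNat := by omega
      have h1 : (List.replicate dn (0 : Int) ++ row).length ≤ c.toNat := by
        simp [List.length_replicate]; omega
      simp only [List.getD, List.getElem?_append_right h1, List.getElem?_replicate]
      split <;> simp

-- value of the padded matrix at a nonnegative row index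
lemma pv_padded_row (matrix : List (List Int)) (pad : List Int → List Int) (dn : Nat) (zr : List Int)
    (t : Int) (ht0 : 0 ≤ t) (ht1 : t < (matrix.length : Int) + 2 * dn) :
    PySem.List.pyGetD (List.replicate dn zr ++ matrix.map pad ++ List.replicate dn zr) t []
      = if (dn : Int) ≤ t ∧ t < (dn : Int) + matrix.length
          then pad (PySem.List.pyGetD matrix (t - dn) []) else zr := by
  rw [PySem.List.pyGetD_of_nonneg _ _ ht0]
  split
  · rename_i hin
    rw [PySem.List.pyGetD_of_nonneg _ _ (by omega)]
    have h1 : t.toNat < (List.replicate dn zr ++ matrix.map pad).length := by simp; omega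
    have h2 : (List.replicate dn zr).length ≤ t.toNat := by simp; omega
    simp only [List.getD, List.getElem?_append_left h1, List.getElem?_append_right h2,
      List.length_replicate, List.getElem?_map]
    have hn : t.toNat - dn = (t - dn).toNat := by omega
    rw [hn]
    have hlt : (t - (dn : Int)).toNat < matrix.length := by omega
    rw [List.getElem?_eq_getElem hlt]
    simp
  · rename_i hout
    rcases Nat.lt_or_ge t.toNat dn with hlt | hge
    · have h1 : t.toNat < (List.replicate dn zr).length := by simpa using hlt
      have h2 : t.toNat < (List.replicate dn zr ++ matrix.map pad).length := by simp; omega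
      simp [List.getD, List.getElem?_append_left h1, hlt]
    · have h1 : (List.replicate dn zr ++ matrix.map pad).length ≤ t.toNat := by simp; omega
      have h3 : t.toNat - (dn + matrix.length) < dn := by omega
      rw [List.append_assoc]
      have h1' : (List.replicate dn zr).length ≤ t.toNat := by simp; omega
      have h2' : (List.map pad matrix).length ≤ t.toNat - dn := by simp; omega
      simp only [List.getD, List.getElem?_append_right h1', List.getElem?_append_right h2',
        List.length_replicate, List.length_map, List.getElem?_replicate]
      have : t.toNat - dn - matrix.length < dn := by omega
      simp [this]

-- ===== VERDICT (by name: the statement is the Claim_ definition above) =====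
theorem full_correlate_spec : Claim_equal_full_correlate := by
  intro matrix kernel _ hpre
  obtain ⟨hmne, hkne, hrows, hkrows⟩ := hpre
  unfold Spec_full_correlate
  have h0 : PySem.List.pyGetD matrix 0 [] = matrix.headI := by
    cases matrix with
    | nil => exact absurd rfl hmne
    | cons a l => rw [PySem.List.pyGetD_zero]; rfl
  have hK1 : 1 ≤ (kernel.length : Int) := by
    have := List.length_pos_of_ne_nil hkne; omega
  have hM1 : 1 ≤ (matrix.length : Int) := by
    have := List.length_pos_of_ne_nil hmne; omega
  simp only [full_correlate, full_correlate_alt, valid_correlate_A, h0, pv_map_const_pyRange,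
    sub_zero]
  set dn : Nat := ((kernel.length : Int) - 1).toNat with hdn_def
  have hdn : (dn : Int) = (kernel.length : Int) - 1 := by omega
  set zr : List Int :=
    List.replicate ((matrix.headI.length : Int) + 2 * ((kernel.length : Int) - 1)).toNat (0 : Int)
    with hzr_def
  set pad : List Int → List Int :=
    fun row => List.replicate dn (0 : Int) ++ row ++ List.replicate dn (0 : Int) with hpad_def
  set p : List (List Int) := List.replicate dn zr ++ matrix.map pad ++ List.replicate dn zr
    with hp_def
  have hzr : ∀ x ∈ zr, x = 0 := fun x hx => List.eq_of_mem_replicate hx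
  have hzrlen : (zr.length : Int) = (matrix.headI.length : Int) + 2 * ((kernel.length : Int) - 1) := by
    rw [hzr_def]; simp; omega
  have hplen : (p.length : Int) = (matrix.length : Int) + 2 * dn := by
    rw [hp_def]; simp; omega
  have hrow : (p.length : Int) - (kernel.length : Int) + 1
      = (matrix.length : Int) + ((kernel.length : Int) - 1) := by omega
  have hp0 : PySem.List.pyGetD p 0 [] = if (dn : Int) ≤ 0 ∧ (0 : Int) < (dn : Int) + matrix.length
      then pad (PySem.List.pyGetD matrix (0 - dn) []) else zr := by
    rw [hp_def]; exact pv_padded_row matrix pad dn zr 0 le_rfl (by omega)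
  have hcol : ((PySem.List.pyGetD p 0 []).length : Int) - (kernel.length : Int) + 1
      = (matrix.headI.length : Int) + ((kernel.length : Int) - 1) := by
    rw [hp0]
    rcases Nat.eq_zero_or_pos dn with hd0 | hd0
    · rw [if_pos (by omega)]
      have : PySem.List.pyGetD matrix (0 - (dn : Int)) [] = matrix.headI := by
        rw [hd0]; simpa using h0
      rw [this, hpad_def]
      simp [hd0]; omega
    · rw [if_neg (by omega)]
      omega
  rw [hrow, hcol]
  refine List.map_congr_left fun i hi => ?_
  obtain ⟨hi0, hi1⟩ := PySem.List.mem_pyRange_one.mp hi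
  refine List.map_congr_left fun j hj => ?_
  obtain ⟨hj0, hj1⟩ := PySem.List.mem_pyRange_one.mp hj
  simp only [PySem.List.foldl_add, pv_foldl_if_add, zero_add]
  refine congrArg List.sum (List.map_congr_left fun k hk => ?_)
  obtain ⟨hk0, hk1⟩ := PySem.List.mem_pyRange_one.mp hk
  have hpik : PySem.List.pyGetD p (i + k) []
      = if (dn : Int) ≤ i + k ∧ i + k < (dn : Int) + matrix.length
          then pad (PySem.List.pyGetD matrix (i + k - dn) []) else zr := by
    rw [hp_def]; exact pv_padded_row matrix pad dn zr (i + k) (by omega) (by omega)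
  rw [hpik]
  by_cases hP : 0 ≤ i + k - ((kernel.length : Int) - 1)
      ∧ i + k - ((kernel.length : Int) - 1) < (matrix.length : Int)
  · rw [if_pos (by constructor <;> omega), if_pos hP]
    have hidx : i + k - (dn : Int) = i + k - ((kernel.length : Int) - 1) := by omega
    rw [hidx]
    refine congrArg List.sum (List.map_congr_left fun l hl => ?_)
    obtain ⟨hl0, hl1⟩ := PySem.List.mem_pyRange_one.mp hl
    rw [hpad_def]
    rw [pv_pad_val _ dn (j + l) (by omega)]
    rw [hdn]
    set mr := PySem.List.pyGetD matrix (i + k - ((kernel.length : Int) - 1)) [] with hmr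
    split_ifs with h1 h2 h2
    · rfl
    · exact absurd ⟨by omega, by omega⟩ h2
    · exact absurd ⟨by omega, by omega⟩ h1
    · exact zero_mul _
  · rw [if_neg (by intro h; exact hP ⟨by omega, by omega⟩), if_neg hP]
    have hz : ∀ c : Int, PySem.List.pyGetD zr c 0 = 0 := fun c => pv_pyGetD_zero_list zr hzr c
    simp [hz]
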